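-- pv_equiv track=rewrite | github.com/tresoldi/freqprob | docs/tutorial_2_advanced_methods.py | generate_trigrams
-- ===== SOURCE A (Python) =====
-- def generate_trigrams(words):
--     """Generate trigrams from a list of words, treating periods as sentence boundaries."""
--     trigrams = []
--     # Start with two sentence boundary markers
--     context = ["<s>", "<s>"]
--
--     for word in words:
--         # Add the trigram
--         trigrams.append((context[0], context[1], word))
--
--         # Check if this word ends with sentence-ending punctuation
--         # Reset context for new sentence, or shift context window
--         context = ["<s>", "<s>"] if word.endswith((".", "!", "?", ":", ";")) else [context[1], word]
--
--     # Add final trigrams with sentence end markers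
--     trigrams.append((context[0], context[1], "</s>"))
--     trigrams.append((context[1], "</s>", "</s>"))
--
--     return trigrams
-- ===== SOURCE B (Python) =====
-- def generate_trigrams(words):
--     """Generate trigrams from a list of words, treating periods as sentence boundaries."""
--     # Partition words into completed sentences plus a trailing open sentence.
--     sentences = []
--     cur = []
--     for w in words:
--         cur.append(w)
--         if w.endswith((".", "!", "?", ":", ";")):
--             sentences.append(cur)
--             cur = []
--     trigrams = []
--     for s in sentences:
--         trigrams.extend(zip(["<s>", "<s>"] + s, ["<s>"] + s, s))
--     trigrams.extend(zip(["<s>", "<s>"] + cur, ["<s>"] + cur, cur))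
--     # Final context = last two tokens of the padded open sentence.
--     tail = ["<s>", "<s>"] + cur
--     c0, c1 = tail[-2], tail[-1]
--     trigrams.append((c0, c1, "</s>"))
--     trigrams.append((c1, "</s>", "</s>"))
--     return trigrams
-- ===== Notes on version B (the rewrite author's own statement) =====
-- stated objective: idiomatic
-- what changed: B first partitions the words into sentences at boundary punctuation, builds each sentence's trigrams by zipping three padded copies of it, concatenates them, and derives the two final </s> trigrams from the last two tokens of the padded trailing open sentence, replacing A's single running-context loop.
import Mathlib
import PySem

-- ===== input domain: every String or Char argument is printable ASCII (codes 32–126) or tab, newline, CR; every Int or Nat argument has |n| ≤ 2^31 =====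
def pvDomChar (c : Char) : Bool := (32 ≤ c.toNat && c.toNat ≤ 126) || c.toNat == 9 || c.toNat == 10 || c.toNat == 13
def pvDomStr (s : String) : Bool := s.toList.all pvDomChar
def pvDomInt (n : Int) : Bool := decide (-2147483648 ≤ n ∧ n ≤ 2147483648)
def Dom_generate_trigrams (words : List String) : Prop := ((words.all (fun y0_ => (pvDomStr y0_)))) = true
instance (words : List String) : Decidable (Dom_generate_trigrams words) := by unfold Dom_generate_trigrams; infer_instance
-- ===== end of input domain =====

-- B splits the input into sentences and zips each sentence's padded copies into trigrams,
-- instead of A's single running-context loop (objective: idiomatic decomposition; same cost).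

-- word.endswith((".", "!", "?", ":", ";")) — shared by both sources
def pvBoundary (w : String) : Bool :=
  PySem.Str.endswith w "." || PySem.Str.endswith w "!" || PySem.Str.endswith w "?" ||
  PySem.Str.endswith w ":" || PySem.Str.endswith w ";"

-- ===== PORT A =====
-- loop body of A: append trigram, then reset or shift the context window
def pvAStep (st : List (String × String × String) × String × String) (w : String) :
    List (String × String × String) × String × String :=
  (st.1 ++ [(st.2.1, st.2.2, w)], if pvBoundary w then ("<s>", "<s>") else (st.2.2, w))

def generate_trigrams (words : List String) : List (String × String × String) :=
  let st := words.foldl pvAStep ([], "<s>", "<s>")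
  st.1 ++ [(st.2.1, st.2.2, "</s>"), (st.2.2, "</s>", "</s>")]

-- ===== PORT B =====
-- zip(["<s>","<s>"]+s, ["<s>"]+s, s), with the 3-tuple as the right-nested pair
def pvTri (s : List String) : List (String × String × String) :=
  List.zip ("<s>" :: "<s>" :: s) (List.zip ("<s>" :: s) s)

-- loop body of B's partition pass: extend the open sentence, close it on a boundary word
def pvSplitStep (st : List (List String) × List String) (w : String) :
    List (List String) × List String :=
  let cur := st.2 ++ [w]
  if pvBoundary w then (st.1 ++ [cur], []) else (st.1, cur)

def generate_trigrams_alt (words : List String) : List (String × String × String) :=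
  let p := words.foldl pvSplitStep ([], [])
  let tail := "<s>" :: "<s>" :: p.2
  -- tail[-2], tail[-1]: in range since tail has ≥ 2 elements
  let c0 := PySem.List.pyGetD tail (-2) ""
  let c1 := PySem.List.pyGetD tail (-1) ""
  p.1.flatMap pvTri ++ pvTri p.2 ++ [(c0, c1, "</s>"), (c1, "</s>", "</s>")]

-- ===== PRECONDITION & SPEC =====
def Spec_generate_trigrams (words : List String) (out : List (String × String × String)) : Prop := out = generate_trigrams_alt words
instance (words : List String) (out : List (String × String × String)) : Decidable (Spec_generate_trigrams words out) := by unfold Spec_generate_trigrams; infer_instance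

-- ===== CLAIM (what is proved, stated in full; the proofs are below) =====
def Claim_equal_generate_trigrams : Prop := ∀ (words : List String), Dom_generate_trigrams words → Spec_generate_trigrams words (generate_trigrams words)

-- ===== LEMMAS AND PROOFS =====

-- last two elements of a :: b :: s
def pvLast2 (a b : String) : List String → String × String
  | [] => (a, b)
  | w :: t => pvLast2 b w t

-- trigrams of sentence s with explicit pad tokens a, b
def pvG (a b : String) (s : List String) : List (String × String × String) :=
  List.zip (a :: b :: s) (List.zip (b :: s) s)

theorem pvTri_eq (s : List String) : pvTri s = pvG "<s>" "<s>" s := rfl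

theorem pvLast2_snoc (s : List String) : ∀ (a b w : String),
    pvLast2 a b (s ++ [w]) = ((pvLast2 a b s).2, w) := by
  induction s with
  | nil => intro a b w; rfl
  | cons x t ih => intro a b w; simpa [pvLast2] using ih b x w

theorem pvG_snoc (s : List String) : ∀ (a b w : String),
    pvG a b (s ++ [w]) = pvG a b s ++ [((pvLast2 a b s).1, (pvLast2 a b s).2, w)] := by
  induction s with
  | nil => intro a b w; rfl
  | cons x t ih =>
      intro a b w
      simp only [pvG, pvLast2, List.cons_append, List.zip_cons_cons]
      simpa [pvG] using congrArg (List.cons (a, b, x)) (ih b x w)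

theorem pvGetElem_last2 (s : List String) : ∀ (a b : String),
    (a :: b :: s)[s.length]? = some (pvLast2 a b s).1 ∧
    (a :: b :: s).getLast? = some (pvLast2 a b s).2 := by
  induction s with
  | nil => intro a b; simp [pvLast2]
  | cons x t ih =>
      intro a b
      refine ⟨?_, ?_⟩
      · simpa [List.getElem?_cons_succ] using (ih b x).1
      · simpa [List.getLast?_cons_cons] using (ih b x).2

theorem pvCtx0 (s : List String) :
    PySem.List.pyGetD ("<s>" :: "<s>" :: s) (-2) "" = (pvLast2 "<s>" "<s>" s).1 := by
  rw [PySem.List.pyGetD_neg_ofNat _ 2 _ (by omega) (by simp)]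
  rw [← Option.some_inj, ← List.getElem?_eq_getElem]
  rw [show ("<s>" :: "<s>" :: s).length - 2 = s.length from by simp]
  exact (pvGetElem_last2 s "<s>" "<s>").1

theorem pvCtx1 (s : List String) :
    PySem.List.pyGetD ("<s>" :: "<s>" :: s) (-1) "" = (pvLast2 "<s>" "<s>" s).2 := by
  have hne : ("<s>" :: "<s>" :: s) ≠ [] := by simp
  rw [PySem.List.pyGetD_neg_one _ _ hne]
  have h := (pvGetElem_last2 s "<s>" "<s>").2
  rw [List.getLast?_eq_some_getLast hne] at h
  exact Option.some.inj h

theorem pvSplit_shift (ws : List String) : ∀ (ss : List (List String)) (cur : List String),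
    ws.foldl pvSplitStep (ss, cur) =
      (ss ++ (ws.foldl pvSplitStep ([], cur)).1, (ws.foldl pvSplitStep ([], cur)).2) := by
  induction ws with
  | nil => intro ss cur; simp
  | cons w rest ih =>
      intro ss cur
      simp only [List.foldl_cons, pvSplitStep]
      by_cases hb : pvBoundary w
      · simp only [hb, if_true, List.nil_append]
        rw [ih (ss ++ [cur ++ [w]]) [], ih [cur ++ [w]] []]
        simp
      · simp [hb]
        exact ih ss (cur ++ [w])

theorem pvMain (ws : List String) : ∀ (acc : List (String × String × String)) (cur : List String),
    ws.foldl pvAStep (acc ++ pvG "<s>" "<s>" cur, pvLast2 "<s>" "<s>" cur) =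
      (acc ++ ((ws.foldl pvSplitStep ([], cur)).1.flatMap pvTri
              ++ pvTri (ws.foldl pvSplitStep ([], cur)).2),
       pvLast2 "<s>" "<s>" (ws.foldl pvSplitStep ([], cur)).2) := by
  induction ws with
  | nil => intro acc cur; simp [pvTri_eq]
  | cons w rest ih =>
      intro acc cur
      simp only [List.foldl_cons, pvAStep, pvSplitStep]
      by_cases hb : pvBoundary w
      · simp only [hb, if_true, List.nil_append]
        have h1 : acc ++ pvG "<s>" "<s>" cur ++ [((pvLast2 "<s>" "<s>" cur).1, (pvLast2 "<s>" "<s>" cur).2, w)]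
            = (acc ++ pvG "<s>" "<s>" (cur ++ [w])) ++ pvG "<s>" "<s>" [] := by
          rw [pvG_snoc]; simp [pvG]
        have h2 : (("<s>", "<s>") : String × String) = pvLast2 "<s>" "<s>" [] := rfl
        rw [h1, h2, ih (acc ++ pvG "<s>" "<s>" (cur ++ [w])) []]
        rw [pvSplit_shift rest [cur ++ [w]] []]
        simp [pvTri_eq]
      · simp only [hb, List.nil_append]
        have h1 : acc ++ pvG "<s>" "<s>" cur ++ [((pvLast2 "<s>" "<s>" cur).1, (pvLast2 "<s>" "<s>" cur).2, w)]
            = acc ++ pvG "<s>" "<s>" (cur ++ [w]) := by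
          rw [pvG_snoc]; simp
        have h2 : (((pvLast2 "<s>" "<s>" cur).2, w) : String × String)
            = pvLast2 "<s>" "<s>" (cur ++ [w]) := (pvLast2_snoc cur "<s>" "<s>" w).symm
        rw [h1, h2]
        exact ih acc (cur ++ [w])

-- ===== VERDICT (by name: the statement is the Claim_ definition above) =====
theorem generate_trigrams_spec : Claim_equal_generate_trigrams := by
  intro words _
  unfold Spec_generate_trigrams generate_trigrams generate_trigrams_alt
  have h := pvMain words [] []
  simp only [List.nil_append, pvG, List.zip_nil_right, pvLast2] at h
  rw [h]
  simp [pvCtx0, pvCtx1]
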